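-- pv_equiv track=rewrite | github.com/YapengLang/PhyLim | src/phylo_limits/has_valid_path.py | break_path
-- ===== SOURCE A (Python) =====
-- def break_path(path: list[str], msyms: set) -> list[set]:
--     """break the path by msyms(the set of sympathetics)"""
--     split_paths = []
--     linked = set()
--     for i in range(len(path)):
--         if path[i] in msyms:
--             if linked:
--                 linked = linked | {path[i]}
--                 split_paths.append(linked)
--             linked = set()
--         else:
--             linked = linked | {path[i]}
--     if len(linked) > 1:
--         split_paths.append(linked)
--
--     return split_paths
-- ===== SOURCE B (Python) =====
-- def break_path(path: list[str], msyms: set) -> list[set]: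
--     """break the path by msyms(the set of sympathetics)"""
--     out = []
--     start = 0
--     for i, x in enumerate(path):
--         if x in msyms:
--             if i > start:
--                 out.append(set(path[start:i]) | {x})
--             start = i + 1
--     tail = set(path[start:])
--     if len(tail) > 1:
--         out.append(tail)
--     return out
-- ===== Notes on version B (the rewrite author's own statement) =====
-- stated objective: alternative
-- what changed: Instead of A's running set accumulator that is grown element by element and flushed at each marker, B only tracks segment boundary indices and materialises each maximal run between markers at once via a slice when its closing marker (or the end) is reached.
import Mathlib
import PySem

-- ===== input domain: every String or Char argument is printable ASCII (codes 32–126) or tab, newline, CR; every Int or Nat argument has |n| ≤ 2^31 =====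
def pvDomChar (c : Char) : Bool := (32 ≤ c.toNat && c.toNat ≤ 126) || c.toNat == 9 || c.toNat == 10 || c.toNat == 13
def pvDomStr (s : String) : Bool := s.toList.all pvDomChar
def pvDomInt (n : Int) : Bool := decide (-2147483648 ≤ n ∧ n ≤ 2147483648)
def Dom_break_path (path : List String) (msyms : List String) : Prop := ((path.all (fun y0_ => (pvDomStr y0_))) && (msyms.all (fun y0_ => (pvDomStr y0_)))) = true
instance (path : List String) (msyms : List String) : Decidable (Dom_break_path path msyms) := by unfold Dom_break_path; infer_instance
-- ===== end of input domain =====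

-- B replaces A's running set accumulator by tracking segment boundary indices and slicing out each maximal run between markers at once; same return value (alternative decomposition, no speed claim).

-- ===== PORT A =====
-- A's loop over i in range(len(path)), processing path[i] in order, with state (split_paths, linked)
def bpLoopA (msyms : List String) (xs : List String) (sp : List (List String)) (linked : PySem.Set String) : List (List String) × PySem.Set String :=
  match xs with
  | [] => (sp, linked)
  | x :: rest =>
    if x ∈ msyms then
      if linked ≠ [] then
        bpLoopA msyms rest (sp ++ [PySem.Set.add linked x]) []
      else
        bpLoopA msyms rest sp []
    else
      bpLoopA msyms rest sp (PySem.Set.add linked x)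

def break_path (path : List String) (msyms : List String) : List (List String) :=
  let r := bpLoopA msyms path [] []
  if 1 < r.2.length then r.1 ++ [r.2] else r.1

-- ===== PORT B =====
-- B's loop body: for (i, x) in enumerate(path): if x in msyms: (maybe emit set(path[start:i]) | {x}); start = i + 1
def bpStepB (path : List String) (msyms : List String)
    (acc : List (List String) × Int) (p : Int × String) : List (List String) × Int :=
  if p.2 ∈ msyms then
    ((if acc.2 < p.1 then
        acc.1 ++ [PySem.Set.add (PySem.Set.ofList (PySem.List.slice path (some acc.2) (some p.1))) p.2]
      else acc.1), p.1 + 1)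
  else acc

def break_path_alt (path : List String) (msyms : List String) : List (List String) :=
  let r := (PySem.List.enumerate path 0).foldl (bpStepB path msyms) ([], 0)
  let tail := PySem.Set.ofList (PySem.List.slice path (some r.2) none)
  if 1 < tail.length then r.1 ++ [tail] else r.1

-- ===== PRECONDITION & SPEC =====
def Spec_break_path (path : List String) (msyms : List String) (out : List (List String)) : Prop := out = break_path_alt path msyms
instance (path : List String) (msyms : List String) (out : List (List String)) : Decidable (Spec_break_path path msyms out) := by unfold Spec_break_path; infer_instance

-- ===== CLAIM (what is proved, stated in full; the proofs are below) =====
def Claim_equal_break_path : Prop := ∀ (path : List String) (msyms : List String), Dom_break_path path msyms → Spec_break_path path msyms (break_path path msyms)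

-- ===== LEMMAS AND PROOFS =====

lemma ofList_eq_nil_iff (l : List String) : PySem.Set.ofList l = [] ↔ l = [] := by
  constructor
  · intro h
    cases l with
    | nil => rfl
    | cons a t =>
      have ha : a ∈ PySem.Set.ofList (a :: t) := by
        rw [PySem.Set.mem_ofList]; exact List.mem_cons_self
      rw [h] at ha; cases ha
  · intro h; subst h; rfl

lemma ofList_append_singleton (l : List String) (x : String) :
    PySem.Set.ofList (l ++ [x]) = PySem.Set.add (PySem.Set.ofList l) x := by
  simp [PySem.Set.ofList_eq_foldl, List.foldl_append]

-- A's loop with linked = set(path[s:|pre|]) equals B's fold over the remaining enumerate, for path = pre ++ rest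
lemma loop_eq (msyms : List String) (rest : List String) :
    ∀ (pre : List String) (sp : List (List String)) (s : Nat),
      s ≤ pre.length →
      (let r := bpLoopA msyms rest sp (PySem.Set.ofList (pre.drop s));
       if 1 < r.2.length then r.1 ++ [r.2] else r.1)
      =
      (let r := (PySem.List.enumerate rest (pre.length : Int)).foldl
                  (bpStepB (pre ++ rest) msyms) (sp, (s : Int));
       let tail := PySem.Set.ofList (PySem.List.slice (pre ++ rest) (some r.2) none);
       if 1 < tail.length then r.1 ++ [tail] else r.1) := by
  induction rest with
  | nil =>
    intro pre sp s hs
    simp only [bpLoopA, PySem.List.enumerate_nil, List.foldl_nil, List.append_nil,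
      PySem.List.slice_from_natCast, List.drop_append_of_le_length hs]
  | cons x rest ih =>
    intro pre sp s hs
    have hdrop : (pre ++ x :: rest).drop s = pre.drop s ++ (x :: rest) :=
      List.drop_append_of_le_length hs
    rw [PySem.List.enumerate_cons]
    by_cases hx : x ∈ msyms
    · -- marker: A flushes linked (if nonempty); B emits the slice (if nonempty) and moves start
      have hslice : PySem.List.slice (pre ++ x :: rest) (some (s : Int)) (some (pre.length : Int))
          = pre.drop s := by
        rw [PySem.List.slice_natCast, hdrop]
        exact List.take_left' (by simp)
      have hpre1 : ((pre ++ [x]).length : Int) = (pre.length : Int) + 1 := by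
        simp
      have happ : pre ++ x :: rest = (pre ++ [x]) ++ rest := by simp
      by_cases hl : pre.drop s = []
      · -- empty segment: s = pre.length
        have hsl : s = pre.length := by
          have := List.drop_eq_nil_iff.mp hl; omega
        have hBcond : ¬ ((s : Int) < (pre.length : Int)) := by omega
        have hofl : PySem.Set.ofList (pre.drop s) = [] := (ofList_eq_nil_iff _).mpr hl
        simp only [bpLoopA, if_pos hx, hofl, ne_eq, not_true_eq_false, if_false,
          List.foldl_cons, bpStepB, if_neg hBcond]
        have := ih (pre ++ [x]) sp (pre.length + 1) (by simp)
        rw [happ]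
        have hdrop2 : (pre ++ [x]).drop (pre.length + 1) = [] := by
          apply List.drop_eq_nil_iff.mpr; simp
        rw [hdrop2] at this
        have hofnil : PySem.Set.ofList ([] : List String) = [] := rfl
        rw [hofnil] at this
        have hc1 : ((pre.length + 1 : Nat) : Int) = (pre.length : Int) + 1 := by push_cast; ring
        rw [hc1, ← hpre1] at this
        simpa using this
      · -- nonempty segment
        have hnl : PySem.Set.ofList (pre.drop s) ≠ [] := by
          intro h; exact hl ((ofList_eq_nil_iff _).mp h)
        have hsl : s < pre.length := by
          rcases Nat.lt_or_ge s pre.length with h | h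
          · exact h
          · exact absurd (List.drop_eq_nil_iff.mpr (by omega)) hl
        have hBcond : (s : Int) < (pre.length : Int) := by omega
        simp only [bpLoopA, if_pos hx, if_pos hnl, List.foldl_cons, bpStepB, if_pos hx,
          if_pos hBcond, hslice]
        have := ih (pre ++ [x]) (sp ++ [PySem.Set.add (PySem.Set.ofList (pre.drop s)) x])
          (pre.length + 1) (by simp)
        rw [happ]
        have hdrop2 : (pre ++ [x]).drop (pre.length + 1) = [] := by
          apply List.drop_eq_nil_iff.mpr; simp
        rw [hdrop2] at this
        have hofnil : PySem.Set.ofList ([] : List String) = [] := rfl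
        rw [hofnil] at this
        have hc1 : ((pre.length + 1 : Nat) : Int) = (pre.length : Int) + 1 := by push_cast; ring
        rw [hc1, ← hpre1] at this
        simpa using this
    · -- non-marker: A adds x to linked; B's state is unchanged
      have happ : pre ++ x :: rest = (pre ++ [x]) ++ rest := by simp
      have hpre1 : ((pre ++ [x]).length : Int) = (pre.length : Int) + 1 := by simp
      simp only [bpLoopA, if_neg hx, List.foldl_cons, bpStepB, if_neg hx]
      have := ih (pre ++ [x]) sp s (by simp; omega)
      have hdrop2 : (pre ++ [x]).drop s = pre.drop s ++ [x] :=
        List.drop_append_of_le_length hs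
      rw [hdrop2, ofList_append_singleton] at this
      rw [happ, ← hpre1]
      simpa using this

-- ===== VERDICT (by name: the statement is the Claim_ definition above) =====
theorem break_path_spec : Claim_equal_break_path := by
  intro path msyms _
  unfold Spec_break_path break_path break_path_alt
  have := loop_eq msyms path [] [] 0 (by simp)
  simpa using this
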